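-- pv_equiv track=rewrite | github.com/Mitan11/Python | up12.py | isPerfectNumber
-- ===== SOURCE A (Python) =====
-- def isPerfectNumber(number):
--     digit = 0
--     sum = 0
--     mul = 1
--     while number > 0 :
--         digit = number % 10
--         sum = sum + digit
--         mul = mul * digit
--         number = number // 10
--     return sum == mul
-- ===== SOURCE B (Python) =====
-- def isPerfectNumber(number):
--     if number <= 0:
--         return False
--     s = 0
--     p = 1
--     for ch in str(number):
--         d = int(ch)
--         s += d
--         p *= d
--     return s == p
-- ===== Notes on version B (the rewrite author's own statement) =====
-- stated objective: idiomatic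
-- what changed: B guards non-positive input and traverses the decimal string of the number most-significant-digit first, instead of A's while loop extracting digits by repeated modulo and floor division by ten.
import Mathlib
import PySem

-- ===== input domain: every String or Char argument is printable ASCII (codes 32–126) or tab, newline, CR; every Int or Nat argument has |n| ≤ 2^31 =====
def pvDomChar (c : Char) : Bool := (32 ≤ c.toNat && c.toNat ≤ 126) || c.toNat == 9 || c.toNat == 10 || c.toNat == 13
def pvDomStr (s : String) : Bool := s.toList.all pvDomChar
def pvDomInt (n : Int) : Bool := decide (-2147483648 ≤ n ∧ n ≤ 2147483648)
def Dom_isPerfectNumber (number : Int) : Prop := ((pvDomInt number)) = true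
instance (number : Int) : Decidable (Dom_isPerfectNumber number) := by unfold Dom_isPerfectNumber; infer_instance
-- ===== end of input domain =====

-- B checks digit-sum == digit-product by iterating over str(number) with a non-positive guard,
-- instead of A's modulo/floor-division while loop: same cost, more idiomatic (objective: idiomatic).


-- ===== PORT A =====
-- the while loop: state (sum, mul, number); digit = number % 10, number //= 10
def pvLoopA (sum mul number : Int) : Bool :=
  if _h : number > 0 then
    let digit := PySem.Int.mod number 10
    pvLoopA (sum + digit) (mul * digit) (PySem.Int.floordiv number 10)
  else
    sum == mul
termination_by number.toNat
decreasing_by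
  rw [PySem.Int.floordiv_eq_ediv_of_pos (by norm_num)]
  omega

def isPerfectNumber (number : Int) : Bool := pvLoopA 0 1 number

-- ===== PORT B =====
-- int(ch): exact for the decimal-digit characters produced by str(number) with number > 0
def pvDigitVal (c : Char) : Int := (c.toNat : Int) - 48

def isPerfectNumber_alt (number : Int) : Bool :=
  if number ≤ 0 then false
  else
    let r := (PySem.Int.toChars number).foldl
      (fun (acc : Int × Int) ch => (acc.1 + pvDigitVal ch, acc.2 * pvDigitVal ch)) (0, 1)
    r.1 == r.2

-- ===== PRECONDITION & SPEC =====
def Spec_isPerfectNumber (number : Int) (out : Bool) : Prop := out = isPerfectNumber_alt number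
instance (number : Int) (out : Bool) : Decidable (Spec_isPerfectNumber number out) := by unfold Spec_isPerfectNumber; infer_instance

-- ===== CLAIM (what is proved, stated in full; the proofs are below) =====
def Claim_equal_isPerfectNumber : Prop := ∀ (number : Int), Dom_isPerfectNumber number → Spec_isPerfectNumber number (isPerfectNumber number)

-- ===== LEMMAS AND PROOFS =====

-- A's loop computes sum/product of Nat.digits 10 (least-significant first)
theorem pvLoopA_eq (n : Nat) : ∀ (s m : Int),
    pvLoopA s m (n : Int) =
      ((s + ((Nat.digits 10 n).map (Nat.cast : Nat → Int)).sum) ==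
       (m * ((Nat.digits 10 n).map (Nat.cast : Nat → Int)).prod)) := by
  induction n using Nat.strong_induction_on with
  | _ n ih =>
    intro s m
    rw [pvLoopA]
    by_cases hn : 0 < n
    · have hpos : (n : Int) > 0 := by exact_mod_cast hn
      rw [dif_pos hpos]
      have hm : PySem.Int.mod (n : Int) 10 = ((n % 10 : Nat) : Int) := by
        exact_mod_cast PySem.Int.mod_natCast n 10
      have hd : PySem.Int.floordiv (n : Int) 10 = ((n / 10 : Nat) : Int) := by
        exact_mod_cast PySem.Int.floordiv_natCast n 10
      rw [hm, hd, ih (n / 10) (Nat.div_lt_self hn (by norm_num)),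
        Nat.digits_def' (b := 10) (by norm_num) hn]
      simp only [List.map_cons, List.sum_cons, List.prod_cons]
      congr 1 <;> push_cast <;> ring
    · have h0 : n = 0 := by omega
      subst h0
      simp

-- evaluating int(·) on the digit characters
theorem pvDigitVal_digitChar (d : Nat) (hd : d < 10) :
    pvDigitVal (Nat.digitChar d) = (d : Int) := by
  interval_cases d <;> rfl

-- Nat.toDigits via its fuel core: the characters are the base-10 digits, most significant first
theorem pvToDigitsCore_eq (f : Nat) : ∀ (n : Nat) (l : List Char), 0 < n → n < f →
    Nat.toDigitsCore 10 f n l = ((Nat.digits 10 n).reverse.map Nat.digitChar) ++ l := by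
  induction f with
  | zero => intro n l _ h; omega
  | succ f ih =>
    intro n l hn hf
    rw [Nat.toDigitsCore]
    rw [Nat.digits_def' (b := 10) (by norm_num) hn]
    by_cases h : n / 10 = 0
    · simp [h, Nat.digits_zero]
    · rw [if_neg h, ih (n / 10) _ (Nat.pos_of_ne_zero h)
        (by have := Nat.div_lt_self hn (by norm_num : 1 < 10); omega)]
      simp

theorem pvToDigits_eq (n : Nat) (hn : 0 < n) :
    Nat.toDigits 10 n = (Nat.digits 10 n).reverse.map Nat.digitChar := by
  have := pvToDigitsCore_eq (n + 1) n [] hn (by omega)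
  simpa [Nat.toDigits] using this

-- B's fold accumulates sum and product of the digit values of the character list
theorem pvFoldB (cs : List Char) : ∀ (s m : Int),
    cs.foldl (fun (acc : Int × Int) ch => (acc.1 + pvDigitVal ch, acc.2 * pvDigitVal ch)) (s, m) =
      (s + (cs.map pvDigitVal).sum, m * (cs.map pvDigitVal).prod) := by
  induction cs with
  | nil => intro s m; simp
  | cons c cs ih =>
    intro s m
    simp only [List.foldl_cons, List.map_cons, List.sum_cons, List.prod_cons, ih,
      Prod.mk.injEq]
    constructor <;> ring

-- ===== VERDICT (by name: the statement is the Claim_ definition above) =====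
theorem isPerfectNumber_spec : Claim_equal_isPerfectNumber := by
  intro number _
  unfold Spec_isPerfectNumber isPerfectNumber isPerfectNumber_alt
  by_cases h : number ≤ 0
  · rw [if_pos h, pvLoopA]
    rw [dif_neg (by omega)]
    decide
  · rw [if_neg h]
    have hpos : 0 < number := by omega
    obtain ⟨n, rfl⟩ : ∃ n : Nat, number = (n : Int) :=
      ⟨number.toNat, (Int.toNat_of_nonneg (by omega)).symm⟩
    have hn : 0 < n := by exact_mod_cast hpos
    have htc : PySem.Int.toChars (n : Int) = Nat.toDigits 10 n := by
      simp [PySem.Int.toChars, Int.not_lt.mpr (by positivity : (0:Int) ≤ (n:Int))]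
    rw [htc, pvToDigits_eq n hn, pvLoopA_eq n 0 1, pvFoldB, List.map_map]
    have hmap : (Nat.digits 10 n).reverse.map (pvDigitVal ∘ Nat.digitChar) =
        (Nat.digits 10 n).reverse.map (Nat.cast : Nat → Int) :=
      List.map_congr_left (fun d hd => pvDigitVal_digitChar d
        (Nat.digits_lt_base (by norm_num) (List.mem_reverse.mp hd)))
    rw [hmap, List.map_reverse, List.sum_reverse, List.prod_reverse]
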